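-- pv_equiv track=rewrite | github.com/ykshif/DM | DM_Assemble.py | calculate_2d_node_positions_descending
-- ===== SOURCE A (Python) =====
-- def calculate_2d_node_positions_descending(first_node, col_interval, num_nodes_row, num_rows, num_cols):
--     """
--     Calculate the positions of nodes in a 2D structure in descending order.
--
--     Parameters:
--     - first_node: The ID of the first force node.
--     - col_interval: The interval between nodes in two module.
--     - num_nodes_row: The number of nodes in a row.
--     - num_rows: The number of modules.
--     - num_cols: The number of modules.
--
--     Returns:
--     - nodes: A list of node IDs.
--     """
--
--     # Calculate the row interval based on the given first node.
--     row_interval = num_nodes_row * col_interval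
--
--     nodes = []
--     for i in range(num_rows):
--         for j in range(num_cols):
--             # Compute the current node's ID.
--             node = first_node - i * row_interval - j * col_interval
--             nodes.append(node)
--     return nodes
-- ===== SOURCE B (Python) =====
-- def calculate_2d_node_positions_descending(first_node, col_interval, num_nodes_row, num_rows, num_cols):
--     # Single flat incremental scan: keep a running value and subtract the
--     # in-row step (col_interval) or the row-boundary jump instead of
--     # recomputing i*row_interval + j*col_interval per cell.
--     if num_rows <= 0 or num_cols <= 0:
--         return []
--     row_jump = (num_nodes_row - (num_cols - 1)) * col_interval
--     nodes = [first_node]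
--     cur = first_node
--     for k in range(1, num_rows * num_cols):
--         cur -= row_jump if k % num_cols == 0 else col_interval
--         nodes.append(cur)
--     return nodes
-- ===== Notes on version B (the rewrite author's own statement) =====
-- stated objective: alternative
-- what changed: B replaces the nested loops that compute first_node - i*row_interval - j*col_interval per cell with a single flat incremental scan that maintains a running value and subtracts a constant in-row step or a row-boundary jump, doing no per-cell multiplication.
import Mathlib
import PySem

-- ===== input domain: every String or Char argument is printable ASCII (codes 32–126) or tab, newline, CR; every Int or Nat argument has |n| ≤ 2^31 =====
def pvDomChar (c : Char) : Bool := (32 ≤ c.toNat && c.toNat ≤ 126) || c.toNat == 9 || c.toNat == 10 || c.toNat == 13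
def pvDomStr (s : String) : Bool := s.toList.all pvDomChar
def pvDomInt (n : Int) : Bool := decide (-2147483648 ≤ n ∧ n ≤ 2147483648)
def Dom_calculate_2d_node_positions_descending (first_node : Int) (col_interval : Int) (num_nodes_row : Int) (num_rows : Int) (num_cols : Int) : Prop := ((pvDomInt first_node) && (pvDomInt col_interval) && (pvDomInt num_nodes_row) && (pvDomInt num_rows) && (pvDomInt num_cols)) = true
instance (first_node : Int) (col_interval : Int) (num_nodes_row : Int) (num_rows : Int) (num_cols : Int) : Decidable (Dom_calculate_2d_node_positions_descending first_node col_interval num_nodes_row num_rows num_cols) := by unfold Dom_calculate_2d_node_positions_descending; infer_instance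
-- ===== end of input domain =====

-- B replaces the nested per-cell-formula loops with one flat incremental scan (running value, constant difference steps); same cost, different algorithm.


-- ===== PORT A =====
def calculate_2d_node_positions_descending (first_node : Int) (col_interval : Int) (num_nodes_row : Int) (num_rows : Int) (num_cols : Int) : List Int :=
  let row_interval := num_nodes_row * col_interval
  (PySem.List.pyRange 0 num_rows 1).foldl (fun nodes i =>
    (PySem.List.pyRange 0 num_cols 1).foldl (fun nodes j =>
      nodes ++ [first_node - i * row_interval - j * col_interval]) nodes) []

-- ===== PORT B =====
-- B: single flat scan over all cell indices, maintaining the current value and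
-- subtracting the in-row step or the row-boundary jump (no per-cell multiplication).
def calculate_2d_node_positions_descending_alt (first_node : Int) (col_interval : Int) (num_nodes_row : Int) (num_rows : Int) (num_cols : Int) : List Int :=
  if num_rows ≤ 0 ∨ num_cols ≤ 0 then [] else
  let row_jump := (num_nodes_row - (num_cols - 1)) * col_interval
  let res := (PySem.List.pyRange 1 (num_rows * num_cols) 1).foldl
      (fun (st : List Int × Int) kk =>
        let cur := st.2 - (if PySem.Int.mod kk num_cols = 0 then row_jump else col_interval)
        (st.1 ++ [cur], cur)) ([first_node], first_node)
  res.1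

-- ===== PRECONDITION & SPEC =====
def Spec_calculate_2d_node_positions_descending (first_node : Int) (col_interval : Int) (num_nodes_row : Int) (num_rows : Int) (num_cols : Int) (out : List Int) : Prop := out = calculate_2d_node_positions_descending_alt first_node col_interval num_nodes_row num_rows num_cols
instance (first_node : Int) (col_interval : Int) (num_nodes_row : Int) (num_rows : Int) (num_cols : Int) (out : List Int) : Decidable (Spec_calculate_2d_node_positions_descending first_node col_interval num_nodes_row num_rows num_cols out) := by unfold Spec_calculate_2d_node_positions_descending; infer_instance

-- ===== CLAIM =====
def Claim_equal_calculate_2d_node_positions_descending : Prop := ∀ (first_node : Int) (col_interval : Int) (num_nodes_row : Int) (num_rows : Int) (num_cols : Int), Dom_calculate_2d_node_positions_descending first_node col_interval num_nodes_row num_rows num_cols → Spec_calculate_2d_node_positions_descending first_node col_interval num_nodes_row num_rows num_cols (calculate_2d_node_positions_descending first_node col_interval num_nodes_row num_rows num_cols)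

-- ===== LEMMAS AND PROOFS =====

-- The values produced by t steps of B's scan starting at position s with current value v:
-- .1 the generated list, .2 the final current value.
def scanPair (c rj kI : Int) : Int → Int → Nat → (List Int × Int)
  | v, _, 0 => ([], v)
  | v, s, Nat.succ t =>
      let v' := v - (if PySem.Int.mod s kI = 0 then rj else c)
      let p := scanPair c rj kI v' (s + 1) t
      (v' :: p.1, p.2)

theorem flatMap_congr_mem {α β : Type} {l : List α} {f g : α → List β}
    (h : ∀ a ∈ l, f a = g a) : l.flatMap f = l.flatMap g := by
  induction l with
  | nil => rfl
  | cons a l ih => simp_all [List.flatMap_cons]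

theorem foldB_eq_scanPair (c rj kI : Int) (t : Nat) : ∀ (acc : List Int) (v s : Int),
    (PySem.List.pyRange s (s + (t : Int)) 1).foldl
      (fun (st : List Int × Int) kk =>
        let cur := st.2 - (if PySem.Int.mod kk kI = 0 then rj else c)
        (st.1 ++ [cur], cur)) (acc, v)
    = (acc ++ (scanPair c rj kI v s t).1, (scanPair c rj kI v s t).2) := by
  induction t with
  | zero => intro acc v s; simp [scanPair]
  | succ t ih =>
    intro acc v s
    push_cast
    rw [PySem.List.pyRange_one_cons (show s < s + ((t : Int) + 1) by omega)]
    simp only [List.foldl_cons]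
    rw [show s + ((t : Int) + 1) = (s + 1) + (t : Int) from by ring, ih]
    simp [scanPair]

theorem scanPair_append (c rj kI : Int) (a : Nat) : ∀ (b : Nat) (v s : Int),
    scanPair c rj kI v s (a + b)
    = ((scanPair c rj kI v s a).1 ++ (scanPair c rj kI (scanPair c rj kI v s a).2 (s + a) b).1,
       (scanPair c rj kI (scanPair c rj kI v s a).2 (s + a) b).2) := by
  induction a with
  | zero => intro b v s; simp [scanPair]
  | succ a ih =>
    intro b v s
    have h1 : a + 1 + b = (a + b) + 1 := by omega
    simp only [h1, scanPair, ih]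
    push_cast
    rw [show s + ((a : Int) + 1) = s + 1 + (a : Int) from by ring]
    simp

-- A straight run: no position in [s, s+t) is divisible, so each step subtracts c.
theorem scanPair_straight (c rj kI : Int) (t : Nat) : ∀ (v s : Int),
    (∀ x : Int, s ≤ x → x < s + (t : Int) → PySem.Int.mod x kI ≠ 0) →
    scanPair c rj kI v s t
      = ((List.range t).map (fun (j : Nat) => v - ((j : Int) + 1) * c), v - (t : Int) * c) := by
  induction t with
  | zero => intro v s _; simp [scanPair]
  | succ t ih =>
    intro v s h
    have hs : PySem.Int.mod s kI ≠ 0 := h s le_rfl (by push_cast; omega)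
    rw [scanPair, if_neg hs,
      ih (v - c) (s + 1) (fun x hx1 hx2 => h x (by omega) (by push_cast at hx2 ⊢; omega))]
    rw [Prod.mk.injEq]
    refine ⟨?_, by push_cast; ring⟩
    rw [List.range_succ_eq_map]
    simp only [List.map_cons, List.map_map]
    congr 1
    · push_cast; ring
    · apply List.map_congr_left; intro j _; simp only [Function.comp]; push_cast; ring

-- One full row with its leading boundary jump, for rows i ≥ 1.
theorem scanPair_row (f c n : Int) (kt : Nat) (i : Int) :
    scanPair c ((n - (((kt + 1 : Nat) : Int) - 1)) * c) ((kt + 1 : Nat) : Int)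
      (f - (i - 1) * (n * c) - (((kt + 1 : Nat) : Int) - 1) * c) (i * ((kt + 1 : Nat) : Int)) (kt + 1)
    = ((List.range (kt + 1)).map (fun (j : Nat) => f - i * (n * c) - (j : Int) * c),
       f - i * (n * c) - (((kt + 1 : Nat) : Int) - 1) * c) := by
  have hkpos : (0 : Int) < ((kt : Int) + 1) := by positivity
  have hmod0 : PySem.Int.mod (i * ((kt + 1 : Nat) : Int)) ((kt + 1 : Nat) : Int) = 0 := by
    rw [PySem.Int.mod_eq_emod_of_pos (by push_cast; omega), mul_comm]
    exact Int.mul_emod_right _ _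
  rw [scanPair, if_pos hmod0,
    show f - (i - 1) * (n * c) - (((kt + 1 : Nat) : Int) - 1) * c
        - (n - (((kt + 1 : Nat) : Int) - 1)) * c = f - i * (n * c) from by push_cast; ring,
    scanPair_straight c _ _ kt (f - i * (n * c)) (i * ((kt + 1 : Nat) : Int) + 1)
      (by
        intro x hx1 hx2 hm
        rw [PySem.Int.mod_eq_emod_of_pos (by push_cast; omega)] at hm
        obtain ⟨q, hq⟩ := Int.dvd_of_emod_eq_zero hm
        push_cast at hx1 hx2 hq
        have h5 : ((kt : Int) + 1) * i < ((kt : Int) + 1) * q := by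
          rw [mul_comm ((kt : Int) + 1) i]; linarith
        have h6 : ((kt : Int) + 1) * q < ((kt : Int) + 1) * (i + 1) := by
          have e : ((kt : Int) + 1) * (i + 1) = i * ((kt : Int) + 1) + ((kt : Int) + 1) := by ring
          rw [e]; linarith
        have hq1 : i < q := lt_of_mul_lt_mul_left h5 (by positivity)
        have hq2 : q < i + 1 := lt_of_mul_lt_mul_left h6 (by positivity)
        omega)]
  rw [Prod.mk.injEq]
  refine ⟨?_, by push_cast; ring⟩
  rw [List.range_succ_eq_map]
  simp only [List.map_cons, List.map_map, List.cons.injEq]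
  exact ⟨by push_cast; ring,
    List.map_congr_left fun j _ => by simp only [Function.comp]; push_cast; ring⟩

-- t consecutive rows (each with its leading jump), starting at row i ≥ 1.
theorem scanPair_rows (f c n : Int) (kt : Nat) (t : Nat) : ∀ (i : Int), 1 ≤ i →
    scanPair c ((n - (((kt + 1 : Nat) : Int) - 1)) * c) ((kt + 1 : Nat) : Int)
      (f - (i - 1) * (n * c) - (((kt + 1 : Nat) : Int) - 1) * c) (i * ((kt + 1 : Nat) : Int)) (t * (kt + 1))
    = ((List.range t).flatMap (fun (d : Nat) => (List.range (kt + 1)).map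
          (fun (j : Nat) => f - (i + (d : Int)) * (n * c) - (j : Int) * c)),
       f - (i + (t : Int) - 1) * (n * c) - (((kt + 1 : Nat) : Int) - 1) * c) := by
  induction t with
  | zero =>
    intro i hi
    simp only [Nat.zero_mul, scanPair, List.range_zero, List.flatMap_nil]
    rw [Prod.mk.injEq]
    exact ⟨rfl, by push_cast; ring⟩
  | succ t ih =>
    intro i hi
    rw [show (t + 1) * (kt + 1) = (kt + 1) + t * (kt + 1) from by ring,
      scanPair_append, scanPair_row f c n kt i,
      show i * ((kt + 1 : Nat) : Int) + ((kt + 1 : Nat) : Int) = (i + 1) * ((kt + 1 : Nat) : Int) from by ring,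
      show f - i * (n * c) - (((kt + 1 : Nat) : Int) - 1) * c
          = f - ((i + 1) - 1) * (n * c) - (((kt + 1 : Nat) : Int) - 1) * c from by ring,
      ih (i + 1) (by omega)]
    rw [Prod.mk.injEq]
    refine ⟨?_, by push_cast; ring⟩
    simp only
    rw [show List.range (t + 1) = 0 :: (List.range t).map Nat.succ from List.range_succ_eq_map,
      List.flatMap_cons, List.flatMap_map]
    simp only [Nat.cast_zero, add_zero]
    congr 1
    apply flatMap_congr_mem; intro d _
    apply List.map_congr_left; intro j _; push_cast; ring

-- ===== VERDICT =====
theorem calculate_2d_node_positions_descending_spec : Claim_equal_calculate_2d_node_positions_descending := by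
  intro f c n r k _
  unfold Spec_calculate_2d_node_positions_descending
  unfold calculate_2d_node_positions_descending calculate_2d_node_positions_descending_alt
  by_cases hdeg : r ≤ 0 ∨ k ≤ 0
  · rw [if_pos hdeg]
    rcases hdeg with h | h <;>
      simp [PySem.List.pyRange_one_eq_nil (by omega : _)]
  · rw [if_neg hdeg]
    push_neg at hdeg
    obtain ⟨hr, hk⟩ := hdeg
    obtain ⟨rn, rfl⟩ : ∃ rn : Nat, r = (rn : Int) := ⟨r.toNat, (Int.toNat_of_nonneg (by omega)).symm⟩
    obtain ⟨kn, rfl⟩ : ∃ kn : Nat, k = (kn : Int) := ⟨k.toNat, (Int.toNat_of_nonneg (by omega)).symm⟩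
    obtain ⟨rt, rfl⟩ : ∃ rt, rn = rt + 1 := ⟨rn - 1, by omega⟩
    obtain ⟨kt, rfl⟩ : ∃ kt, kn = kt + 1 := ⟨kn - 1, by omega⟩
    -- A side: rewrite the nested foldl as a flatMap of mapped ranges.
    simp only [PySem.List.foldl_append_singleton_eq_map, PySem.List.foldl_append_eq_flatMap,
      List.nil_append]
    -- B side: turn the foldl into scanPair and evaluate the scan.
    rw [show ((rt + 1 : Nat) : Int) * ((kt + 1 : Nat) : Int)
        = 1 + ((kt + rt * (kt + 1) : Nat) : Int) from by push_cast; ring,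
      foldB_eq_scanPair, scanPair_append,
      scanPair_straight c _ _ kt f 1
        (by
          intro x hx1 hx2 hm
          rw [PySem.Int.mod_eq_emod_of_pos (by push_cast; omega)] at hm
          obtain ⟨q, hq⟩ := Int.dvd_of_emod_eq_zero hm
          push_cast at hx2 hq
          have h5 : ((kt : Int) + 1) * 0 < ((kt : Int) + 1) * q := by rw [mul_zero]; linarith
          have h6 : ((kt : Int) + 1) * q < ((kt : Int) + 1) * 1 := by rw [mul_one]; linarith
          have hq1 : (0 : Int) < q := lt_of_mul_lt_mul_left h5 (by positivity)
          have hq2 : q < 1 := lt_of_mul_lt_mul_left h6 (by positivity)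
          omega)]
    simp only
    rw [show (1 : Int) + ((kt : Nat) : Int) = 1 * ((kt + 1 : Nat) : Int) from by push_cast; ring,
      show f - ((kt : Nat) : Int) * c = f - ((1 : Int) - 1) * (n * c) - (((kt + 1 : Nat) : Int) - 1) * c
        from by push_cast; ring,
      scanPair_rows f c n kt rt 1 le_rfl]
    -- Both sides are now explicit lists over List.range; compare them.
    rw [show (PySem.List.pyRange 0 ((rt + 1 : Nat) : Int) 1) = (List.range (rt + 1)).map (fun i : Nat => (i : Int))
        from by rw [PySem.List.pyRange_one]; simp,
      show (PySem.List.pyRange 0 ((kt + 1 : Nat) : Int) 1) = (List.range (kt + 1)).map (fun j : Nat => (j : Int))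
        from by rw [PySem.List.pyRange_one]; simp]
    rw [List.flatMap_map]
    simp only [List.map_map]
    rw [show List.range (rt + 1) = 0 :: (List.range rt).map Nat.succ from List.range_succ_eq_map,
      List.flatMap_cons, List.flatMap_map]
    have hhead : (List.range (kt + 1)).map ((fun (j : Int) => f - ((0 : Nat) : Int) * (n * c) - j * c) ∘ (fun (j : Nat) => (j : Int)))
        = f :: (List.range kt).map (fun (j : Nat) => f - ((j : Int) + 1) * c) := by
      rw [List.range_succ_eq_map]
      simp only [List.map_cons, List.map_map]
      congr 1
      · simp [Function.comp]
      · apply List.map_congr_left; intro j _; simp only [Function.comp]; push_cast; ring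
    rw [hhead, List.cons_append, List.singleton_append]
    congr 1
    congr 1
    apply flatMap_congr_mem; intro d _
    apply List.map_congr_left; intro j _; simp only [Function.comp]; push_cast; ring
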